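-- pv_equiv track=rewrite | github.com/scottdraper8/yaha | compile_blocklist.py | build_acknowledgments
-- ===== SOURCE A (Python) =====
-- def build_acknowledgments(blocklists: list[dict[str, str]]) -> str:
--     """
--     Build acknowledgments list from active blocklists.
--
--     Groups blocklists by maintainer and removes duplicates.
--     Uses optional acknowledgment fields from blocklist configuration.
--
--     Args:
--         blocklists: List of blocklist configurations
--
--     Returns:
--         Formatted acknowledgments as markdown list
--     """
--     # Track unique maintainers: maintainer_name -> (url, description)
--     maintainers: dict[str, tuple[str, str]] = {}
--
--     for blocklist in blocklists:
--         # Check for optional acknowledgment fields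
--         maintainer_name = blocklist.get("maintainer_name")
--         maintainer_url = blocklist.get("maintainer_url")
--         maintainer_desc = blocklist.get("maintainer_description")
--
--         # Only add if all acknowledgment fields are present
--         if maintainer_name and maintainer_url and maintainer_desc:
--             # Use maintainer_name as key to deduplicate
--             if maintainer_name not in maintainers:
--                 maintainers[maintainer_name] = (maintainer_url, maintainer_desc)
--
--     # Sort by maintainer name alphabetically
--     sorted_maintainers = sorted(maintainers.items())
--
--     # Build markdown list
--     lines = []
--     for maintainer_name, (url, desc) in sorted_maintainers:
--         lines.append(f"- [{maintainer_name}]({url}) - {desc}")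
--
--     return "\n".join(lines) if lines else "No maintainer information available."
-- ===== SOURCE B (Python) =====
-- def build_acknowledgments(blocklists: list[dict[str, str]]) -> str:
--     """
--     Build acknowledgments list from active blocklists.
--
--     Collects complete (name, url, description) entries, stable-sorts them by
--     maintainer name, and emits one markdown line per name (first entry wins).
--     """
--     entries = []
--     for blocklist in blocklists:
--         name = blocklist.get("maintainer_name")
--         url = blocklist.get("maintainer_url")
--         desc = blocklist.get("maintainer_description")
--         if name and url and desc:
--             entries.append((name, url, desc))
--
--     entries.sort(key=lambda entry: entry[0])
--
--     lines = []
--     prev = None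
--     for name, url, desc in entries:
--         if name != prev:
--             lines.append(f"- [{name}]({url}) - {desc}")
--             prev = name
--
--     return "\n".join(lines) if lines else "No maintainer information available."
-- ===== Notes on version B (the rewrite author's own statement) =====
-- stated objective: alternative
-- what changed: Replaces A's dict accumulator with insert-if-absent plus a sort of its items by a flat list of complete (name,url,desc) entries that is stable-sorted by name and deduplicated in one adjacent-group pass (first entry per name wins).
import Mathlib
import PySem

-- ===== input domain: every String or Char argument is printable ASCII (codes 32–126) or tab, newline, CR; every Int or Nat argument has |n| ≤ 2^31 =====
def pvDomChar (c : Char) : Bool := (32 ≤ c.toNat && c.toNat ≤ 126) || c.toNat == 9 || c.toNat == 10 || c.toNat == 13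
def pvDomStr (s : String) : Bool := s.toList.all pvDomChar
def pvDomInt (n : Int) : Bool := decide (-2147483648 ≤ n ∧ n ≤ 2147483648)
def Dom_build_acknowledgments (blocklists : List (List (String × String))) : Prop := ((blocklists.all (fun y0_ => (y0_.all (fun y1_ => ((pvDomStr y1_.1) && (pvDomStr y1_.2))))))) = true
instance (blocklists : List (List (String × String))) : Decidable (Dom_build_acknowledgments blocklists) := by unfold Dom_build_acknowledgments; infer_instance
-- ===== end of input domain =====

-- B replaces A's dict accumulator + items sort by a flat entry list, stable-sorted by name, deduplicated in one adjacent pass (alternative decomposition, same results).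


-- ===== PORT A =====
-- blocklist.get(k) on the association-list dict (first match)
def pvGet (bl : List (String × String)) (k : String) : Option String :=
  (PySem.Dict.mk bl).get? k

-- the body of A's 'for blocklist in blocklists' loop
def pvStepA (m : PySem.Dict String (String × String)) (bl : List (String × String)) :
    PySem.Dict String (String × String) :=
  match pvGet bl "maintainer_name", pvGet bl "maintainer_url", pvGet bl "maintainer_description" with
  | some n, some u, some d =>
      if n ≠ "" ∧ u ≠ "" ∧ d ≠ "" then (if m.contains n then m else m.insert n (u, d)) else m
  | _, _, _ => m

def build_acknowledgments (blocklists : List (List (String × String))) : String :=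
  let maintainers := blocklists.foldl pvStepA PySem.Dict.empty
  -- sorted(maintainers.items()): dict keys are unique, so Python's tuple comparison is
  -- always decided by the name alone — sorting by the first component is exact here
  let sortedM := PySem.List.sorted maintainers.items (fun p => p.1) false
  let lines := sortedM.foldl
    (fun acc p => acc ++ ["- [" ++ p.1 ++ "](" ++ p.2.1 ++ ") - " ++ p.2.2]) ([] : List String)
  if lines ≠ [] then PySem.Str.join "\n" lines else "No maintainer information available."

-- ===== PORT B =====
-- the body of B's first loop: append the entry when all three fields are present and truthy
def pvStepB (acc : List (String × String × String)) (bl : List (String × String)) :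
    List (String × String × String) :=
  match pvGet bl "maintainer_name", pvGet bl "maintainer_url", pvGet bl "maintainer_description" with
  | some n, some u, some d => if n ≠ "" ∧ u ≠ "" ∧ d ≠ "" then acc ++ [(n, u, d)] else acc
  | _, _, _ => acc

-- B's second loop: emit a line whenever the name differs from the previously emitted one
def pvLinesB : Option String → List (String × String × String) → List String
  | _, [] => []
  | prev, (n, u, d) :: rest =>
      if some n ≠ prev then ("- [" ++ n ++ "](" ++ u ++ ") - " ++ d) :: pvLinesB (some n) rest
      else pvLinesB prev rest

def build_acknowledgments_alt (blocklists : List (List (String × String))) : String :=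
  let entries := blocklists.foldl pvStepB []
  -- entries.sort(key=lambda entry: entry[0]) — Python's sort is stable
  let sortedE := PySem.List.sorted entries (fun t => t.1) false
  let lines := pvLinesB none sortedE
  if lines ≠ [] then PySem.Str.join "\n" lines else "No maintainer information available."

-- ===== PRECONDITION & SPEC =====
def Spec_build_acknowledgments (blocklists : List (List (String × String))) (out : String) : Prop := out = build_acknowledgments_alt blocklists
instance (blocklists : List (List (String × String))) (out : String) : Decidable (Spec_build_acknowledgments blocklists out) := by unfold Spec_build_acknowledgments; infer_instance

-- ===== CLAIM (what is proved, stated in full; the proofs are below) =====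
def Claim_equal_build_acknowledgments : Prop := ∀ (blocklists : List (List (String × String))), Dom_build_acknowledgments blocklists → Spec_build_acknowledgments blocklists (build_acknowledgments blocklists)

-- ===== LEMMAS AND PROOFS =====

-- the candidate triple of one blocklist
def pvCand (bl : List (String × String)) : Option String × Option String × Option String :=
  (pvGet bl "maintainer_name", pvGet bl "maintainer_url", pvGet bl "maintainer_description")

-- the truthiness filter shared by both loops
def pvKeep (t : Option String × Option String × Option String) :
    Option (String × String × String) :=
  match t with
  | (some n, some u, some d) => if n ≠ "" ∧ u ≠ "" ∧ d ≠ "" then some (n, u, d) else none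
  | _ => none

-- first-occurrence dedup of triples by name, given already-seen names
def dfirst (seen : List String) : List (String × String × String) → List (String × String × String)
  | [] => []
  | t :: rest => if t.1 ∈ seen then dfirst seen rest else t :: dfirst (t.1 :: seen) rest

-- A's conditional insert, on an extracted triple
def step2 (m : PySem.Dict String (String × String)) (t : String × String × String) :
    PySem.Dict String (String × String) :=
  if m.contains t.1 then m else m.insert t.1 t.2

-- B's dedup pass, on triples instead of formatted lines
def pvDedup : Option String → List (String × String × String) → List (String × String × String)
  | _, [] => []
  | prev, t :: rest => if some t.1 ≠ prev then t :: pvDedup (some t.1) rest else pvDedup prev rest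

-- B's line formatter
def fmtT (t : String × String × String) : String :=
  "- [" ++ t.1 ++ "](" ++ t.2.1 ++ ") - " ++ t.2.2

theorem linesB_eq_map (prev : Option String) (l : List (String × String × String)) :
    pvLinesB prev l = (pvDedup prev l).map fmtT := by
  induction l generalizing prev with
  | nil => rfl
  | cons t rest ih =>
      rcases t with ⟨n, u, d⟩
      simp only [pvLinesB, pvDedup]
      split <;> simp [ih, fmtT]

theorem stepA_eq (m : PySem.Dict String (String × String)) (bl : List (String × String)) :
    pvStepA m bl = match pvKeep (pvCand bl) with
      | some t => step2 m t
      | none => m := by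
  simp only [pvStepA, pvCand, pvKeep, step2]
  rcases pvGet bl "maintainer_name" with _ | n <;>
    rcases pvGet bl "maintainer_url" with _ | u <;>
      rcases pvGet bl "maintainer_description" with _ | d
  all_goals simp
  split <;> rfl

theorem foldA_eq (bls : List (List (String × String))) (m : PySem.Dict String (String × String)) :
    bls.foldl pvStepA m = ((bls.map pvCand).filterMap pvKeep).foldl step2 m := by
  induction bls generalizing m with
  | nil => rfl
  | cons bl rest ih =>
      simp only [List.foldl_cons, List.map_cons, List.filterMap_cons, stepA_eq]
      cases pvKeep (pvCand bl) with
      | none => exact ih m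
      | some t => simp only [List.foldl_cons]; exact ih (step2 m t)

theorem stepB_eq (acc : List (String × String × String)) (bl : List (String × String)) :
    pvStepB acc bl = match pvKeep (pvCand bl) with
      | some t => acc ++ [t]
      | none => acc := by
  simp only [pvStepB, pvCand, pvKeep]
  rcases pvGet bl "maintainer_name" with _ | n <;>
    rcases pvGet bl "maintainer_url" with _ | u <;>
      rcases pvGet bl "maintainer_description" with _ | d
  all_goals simp
  split <;> rfl

theorem foldB_eq (bls : List (List (String × String))) (acc : List (String × String × String)) :
    bls.foldl pvStepB acc = acc ++ (bls.map pvCand).filterMap pvKeep := by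
  induction bls generalizing acc with
  | nil => simp
  | cons bl rest ih =>
      simp only [List.foldl_cons, List.map_cons, List.filterMap_cons, stepB_eq]
      cases pvKeep (pvCand bl) with
      | none => exact ih acc
      | some t => rw [ih (acc ++ [t])]; simp

theorem dfirst_congr (ps : List (String × String × String)) (s s' : List String)
    (h : ∀ x, x ∈ s ↔ x ∈ s') : dfirst s ps = dfirst s' ps := by
  induction ps generalizing s s' with
  | nil => rfl
  | cons t rest ih =>
      simp only [dfirst]
      by_cases hm : t.1 ∈ s
      · rw [if_pos hm, if_pos ((h t.1).1 hm)]; exact ih s s' h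
      · rw [if_neg hm, if_neg (fun hc => hm ((h t.1).2 hc))]
        rw [ih (t.1 :: s) (t.1 :: s') (by intro x; simp [h x])]

theorem items_fold (ps : List (String × String × String)) (m : PySem.Dict String (String × String))
    (hnd : m.keys.Nodup) :
    (ps.foldl step2 m).items = m.items ++ dfirst m.keys ps := by
  induction ps generalizing m with
  | nil => simp [dfirst]
  | cons t rest ih =>
      simp only [List.foldl_cons, dfirst, step2]
      by_cases hc : m.contains t.1 = true
      · rw [if_pos hc, if_pos ((PySem.Dict.contains_iff_mem_keys m t.1).mp hc)]
        exact ih m hnd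
      · have hcf : m.contains t.1 = false := by simpa using hc
        have hnm : t.1 ∉ m.keys := fun h => hc ((PySem.Dict.contains_iff_mem_keys m t.1).mpr h)
        rw [if_neg hc, if_neg hnm]
        have hk : (m.insert t.1 t.2).keys = m.keys ++ [t.1] :=
          PySem.Dict.keys_insert_of_not_contains m t.2 hcf
        have hnd' : (m.insert t.1 t.2).keys.Nodup := PySem.Dict.nodup_keys_insert m t.1 t.2 hnd
        rw [ih (m.insert t.1 t.2) hnd',
          PySem.Dict.items_insert_of_not_contains m t.2 hcf, hk,
          dfirst_congr rest (m.keys ++ [t.1]) (t.1 :: m.keys) (by intro x; simp [or_comm]),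
          List.append_assoc]
        simp

theorem dfirst_find (ps : List (String × String × String)) (seen : List String)
    (t : String × String × String) (ht : t ∈ dfirst seen ps) :
    ps.find? (fun x => x.1 == t.1) = some t ∧ t.1 ∉ seen := by
  induction ps generalizing seen with
  | nil => simp [dfirst] at ht
  | cons p rest ih =>
      simp only [dfirst] at ht
      by_cases hm : p.1 ∈ seen
      · rw [if_pos hm] at ht
        obtain ⟨hf, hns⟩ := ih seen ht
        have hne : ¬ ((fun x => x.1 == t.1) p) = true := by
          simp only [beq_iff_eq]; intro h; exact hns (h ▸ hm)
        exact ⟨(List.find?_cons_of_neg (p := fun x : String × String × String => x.1 == t.1) hne).trans hf, hns⟩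
      · rw [if_neg hm] at ht
        rcases List.mem_cons.mp ht with rfl | ht'
        · exact ⟨List.find?_cons_of_pos (p := fun x : String × String × String => x.1 == t.1) (by simp), hm⟩
        · obtain ⟨hf, hns⟩ := ih (p.1 :: seen) ht'
          have hpt : p.1 ≠ t.1 := fun h => hns (by simp [h])
          have hns' : t.1 ∉ seen := fun h => hns (by simp [h])
          exact ⟨(List.find?_cons_of_neg (p := fun x : String × String × String => x.1 == t.1) (by simp [hpt])).trans hf, hns'⟩

theorem dfirst_keys (ps : List (String × String × String)) (s : List String) :
    PySem.Set.update s (ps.map (fun t => t.1)) = s ++ (dfirst s ps).map (fun t => t.1) := by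
  induction ps generalizing s with
  | nil => simp [dfirst, PySem.Set.update]
  | cons t rest ih =>
      simp only [List.map_cons, dfirst]
      by_cases hm : t.1 ∈ s
      · rw [if_pos hm, PySem.Set.update_cons, PySem.Set.add_of_mem hm]
        exact ih s
      · rw [if_neg hm, PySem.Set.update_cons, PySem.Set.add_of_not_mem hm, ih (s ++ [t.1]),
          dfirst_congr rest (t.1 :: s) (s ++ [t.1]) (by intro x; simp [or_comm]),
          List.map_cons, List.append_assoc]
        rfl

-- stability of the insertion sort for first-match search: inserting x keeps every
-- earlier first match, and contributes x only when nothing matched before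
theorem find?_insertBy (n : String) (x : String × String × String)
    (acc : List (String × String × String))
    (hacc : acc.Pairwise (fun a b => a.1 ≤ b.1)) :
    (PySem.List.insertBy (fun a b => decide (a.1 < b.1)) x acc).find? (fun t => t.1 == n)
      = (acc.find? (fun t => t.1 == n)).or (if x.1 == n then some x else none) := by
  induction acc with
  | nil => cases hxn : x.1 == n <;> simp [PySem.List.insertBy, hxn]
  | cons y ys ih =>
      have hy : ∀ z ∈ ys, y.1 ≤ z.1 := (List.pairwise_cons.mp hacc).1
      have hys : ys.Pairwise (fun a b => a.1 ≤ b.1) := (List.pairwise_cons.mp hacc).2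
      simp only [PySem.List.insertBy]
      by_cases hlt : x.1 < y.1
      · rw [if_pos (by simpa using hlt)]
        by_cases hxn : x.1 = n
        · have hnone : (y :: ys).find? (fun t => t.1 == n) = none := by
            rw [List.find?_eq_none]
            intro z hz
            have hyz : y.1 ≤ z.1 := by
              rcases List.mem_cons.mp hz with rfl | hz'
              · exact le_refl _
              · exact hy z hz'
            simp only [beq_iff_eq]
            intro hzn
            exact absurd (lt_of_lt_of_le hlt hyz) (by rw [hzn, hxn]; exact lt_irrefl n)
          rw [List.find?_cons_of_pos (by simp [hxn]), hnone]
          simp [hxn]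
        · rw [List.find?_cons_of_neg (by simp [hxn])]
          simp [hxn]
      · rw [if_neg (by simpa using hlt)]
        by_cases hyn : y.1 = n
        · rw [List.find?_cons_of_pos (by simp [hyn]), List.find?_cons_of_pos (by simp [hyn])]
          simp
        · rw [List.find?_cons_of_neg (by simp [hyn]), List.find?_cons_of_neg (by simp [hyn])]
          exact ih hys

theorem pairwise_insertBy (x : String × String × String)
    (acc : List (String × String × String))
    (hacc : acc.Pairwise (fun a b => a.1 ≤ b.1)) :
    (PySem.List.insertBy (fun a b => decide (a.1 < b.1)) x acc).Pairwise
      (fun a b => a.1 ≤ b.1) := by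
  induction acc with
  | nil => simp [PySem.List.insertBy]
  | cons y ys ih =>
      have hy : ∀ z ∈ ys, y.1 ≤ z.1 := (List.pairwise_cons.mp hacc).1
      have hys : ys.Pairwise (fun a b => a.1 ≤ b.1) := (List.pairwise_cons.mp hacc).2
      simp only [PySem.List.insertBy]
      by_cases hlt : x.1 < y.1
      · rw [if_pos (by simpa using hlt)]
        refine List.pairwise_cons.mpr ⟨?_, hacc⟩
        intro z hz
        rcases List.mem_cons.mp hz with rfl | hz'
        · exact le_of_lt hlt
        · exact le_of_lt (lt_of_lt_of_le hlt (hy z hz'))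
      · rw [if_neg (by simpa using hlt)]
        refine List.pairwise_cons.mpr ⟨?_, ih hys⟩
        intro z hz
        rcases (PySem.List.mem_insertBy _ _ _ _).mp hz with rfl | hz'
        · exact le_of_not_gt hlt
        · exact hy z hz'

theorem find?_foldl_ins (n : String) (l acc : List (String × String × String))
    (hacc : acc.Pairwise (fun a b => a.1 ≤ b.1)) :
    ((l.foldl (fun acc x => PySem.List.insertBy (fun a b => decide (a.1 < b.1)) x acc) acc).find?
        (fun t => t.1 == n))
      = (acc.find? (fun t => t.1 == n)).or (l.find? (fun t => t.1 == n)) := by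
  induction l generalizing acc with
  | nil => simp
  | cons x rest ih =>
      simp only [List.foldl_cons]
      rw [ih _ (pairwise_insertBy x acc hacc), find?_insertBy n x acc hacc, Option.or_assoc]
      congr 1
      by_cases hxn : x.1 = n
      · rw [List.find?_cons_of_pos (by simp [hxn])]; simp [hxn]
      · rw [List.find?_cons_of_neg (by simp [hxn])]; simp [hxn]

-- first-match search is stable under sorting by name
theorem find?_sorted (n : String) (l : List (String × String × String)) :
    (PySem.List.sorted l (fun t => t.1) false).find? (fun t => t.1 == n)
      = l.find? (fun t => t.1 == n) := by
  rw [PySem.List.sorted_eq_foldl_insertBy]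
  simpa using find?_foldl_ins n l [] List.Pairwise.nil

-- on a name-sorted list, the adjacent dedup keeps exactly the first element of each name
theorem dedup_spec (l : List (String × String × String))
    (hl : l.Pairwise (fun a b => a.1 ≤ b.1)) (prev : Option String)
    (hub : ∀ x ∈ l, ∀ m, prev = some m → m ≤ x.1) :
    (∀ t ∈ pvDedup prev l,
        (∀ m, prev = some m → m < t.1) ∧ l.find? (fun x => x.1 == t.1) = some t)
      ∧ (pvDedup prev l).Pairwise (fun a b => a.1 < b.1)
      ∧ (∀ nn, nn ∈ (pvDedup prev l).map (fun t => t.1)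
          ↔ nn ∈ l.map (fun t => t.1) ∧ ∀ m, prev = some m → nn ≠ m) := by
  induction l generalizing prev with
  | nil => simp [pvDedup]
  | cons x rest ih =>
      have hx : ∀ z ∈ rest, x.1 ≤ z.1 := (List.pairwise_cons.mp hl).1
      have hrest : rest.Pairwise (fun a b => a.1 ≤ b.1) := (List.pairwise_cons.mp hl).2
      simp only [pvDedup]
      by_cases hk : some x.1 ≠ prev
      · rw [if_pos hk]
        obtain ⟨ih1, ih2, ih3⟩ := ih hrest (some x.1) (fun z hz m hm => by
          injection hm with hm; exact hm ▸ hx z hz)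
        refine ⟨?_, ?_, ?_⟩
        · intro t ht
          rcases List.mem_cons.mp ht with rfl | ht'
          · refine ⟨fun m hm => ?_, List.find?_cons_of_pos (by simp)⟩
            have hle : m ≤ t.1 := hub t (List.mem_cons_self) m hm
            have hne : m ≠ t.1 := fun h => hk (by rw [hm, h])
            exact lt_of_le_of_ne hle hne
          · obtain ⟨hb, hf⟩ := ih1 t ht'
            have hxt : x.1 < t.1 := hb x.1 rfl
            refine ⟨fun m hm => lt_of_le_of_lt (hub x List.mem_cons_self m hm) hxt, ?_⟩
            rw [List.find?_cons_of_neg (by simp [ne_of_lt hxt]), hf]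
        · refine List.pairwise_cons.mpr ⟨fun z hz => ?_, ih2⟩
          exact (ih1 z hz).1 x.1 rfl
        · intro nn
          simp only [List.map_cons, List.mem_cons, ih3]
          constructor
          · rintro (rfl | ⟨hmem, hne⟩)
            · exact ⟨Or.inl rfl, fun m hm => fun h => hk (by rw [hm, h])⟩
            · refine ⟨Or.inr hmem, fun m hm hcon => ?_⟩
              obtain ⟨z, hz, rfl⟩ := List.mem_map.mp hmem
              have h1 : m ≤ x.1 := hub x List.mem_cons_self m hm
              have h2 : x.1 ≤ z.1 := hx z hz
              have hxm : x.1 = m := le_antisymm (hcon ▸ h2) h1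
              exact hk (by rw [hxm, hm])
          · rintro ⟨(rfl | hmem), hpe⟩
            · exact Or.inl rfl
            · by_cases hnx : nn = x.1
              · exact Or.inl hnx
              · refine Or.inr ⟨hmem, fun m h => ?_⟩
                injection h with h
                subst h
                exact hnx
      · rw [if_neg hk]
        rw [not_ne_iff] at hk
        obtain ⟨m0, hm0⟩ : ∃ m0, prev = some m0 := ⟨x.1, hk.symm⟩
        have hxm : x.1 = m0 := by rw [hm0] at hk; exact Option.some_injective _ hk
        obtain ⟨ih1, ih2, ih3⟩ := ih hrest prev (fun z hz m hm => hub z (List.mem_cons_of_mem x hz) m hm)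
        refine ⟨?_, ih2, ?_⟩
        · intro t ht
          obtain ⟨hb, hf⟩ := ih1 t ht
          have hxt : x.1 < t.1 := hxm ▸ hb m0 hm0
          exact ⟨hb, by rw [List.find?_cons_of_neg (by simp [ne_of_lt hxt]), hf]⟩
        · intro nn
          rw [ih3]
          simp only [List.map_cons, List.mem_cons]
          constructor
          · rintro ⟨hmem, hpe⟩
            exact ⟨Or.inr hmem, hpe⟩
          · rintro ⟨(rfl | hmem), hpe⟩
            · exact absurd rfl (hxm ▸ hpe m0 hm0)
            · exact ⟨hmem, hpe⟩

-- membership in a "first occurrence per name" list is determined by find? on the source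
theorem mem_iff_first (L trips : List (String × String × String))
    (h1 : ∀ t ∈ L, trips.find? (fun x => x.1 == t.1) = some t)
    (hall : ∀ nn, nn ∈ trips.map (fun t => t.1) → nn ∈ L.map (fun t => t.1))
    (t : String × String × String) :
    t ∈ L ↔ trips.find? (fun x => x.1 == t.1) = some t := by
  constructor
  · exact h1 t
  · intro hf
    have hmemT : t ∈ trips := List.mem_of_find?_eq_some hf
    have hname : t.1 ∈ L.map (fun t => t.1) := hall t.1 (List.mem_map.mpr ⟨t, hmemT, rfl⟩)
    obtain ⟨t', ht', he⟩ := List.mem_map.mp hname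
    have := h1 t' ht'
    rw [he] at this
    rw [hf] at this
    injection this with this
    exact this ▸ ht'

-- ===== VERDICT (by name: the statement is the Claim_ definition above) =====
theorem build_acknowledgments_spec : Claim_equal_build_acknowledgments := by
  intro bls _
  unfold Spec_build_acknowledgments
  simp only [build_acknowledgments, build_acknowledgments_alt]
  set trips := (bls.map pvCand).filterMap pvKeep with htrips
  set S := PySem.List.sorted trips (fun t => t.1) false with hS
  -- A's dict items are the first-occurrence triples
  have hitems : (bls.foldl pvStepA PySem.Dict.empty).items = dfirst [] trips := by
    rw [foldA_eq, ← htrips]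
    have h := items_fold trips PySem.Dict.empty (by simp [PySem.Dict.empty, PySem.Dict.keys])
    simpa only [PySem.Dict.empty, PySem.Dict.keys, PySem.Dict.items, List.map_nil,
      List.nil_append] using h
  -- B's entry list is trips
  have hentries : bls.foldl pvStepB [] = trips := by
    rw [foldB_eq, List.nil_append]
  have hSpw : S.Pairwise (fun a b => a.1 ≤ b.1) := PySem.List.sorted_pairwise ..
  obtain ⟨hd1, hd2, hd3⟩ := dedup_spec S hSpw none (by simp)
  have hperm : S.Perm trips := PySem.List.sorted_perm ..
  -- membership characterization of B's dedup output
  have hmemD : ∀ t, t ∈ pvDedup none S ↔ trips.find? (fun x => x.1 == t.1) = some t := by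
    apply mem_iff_first
    · intro t ht
      rw [← find?_sorted t.1 trips]
      exact (hd1 t ht).2
    · intro nn hnn
      rw [hd3 nn]
      exact ⟨((hperm.map (fun t => t.1)).mem_iff).mpr hnn, by simp⟩
  -- membership characterization of A's deduped items
  have hnamesF : (dfirst [] trips).map (fun t => t.1)
      = PySem.Set.ofList (trips.map (fun t => t.1)) := by
    have h := dfirst_keys trips []
    rw [PySem.Set.update_nil_left] at h
    simpa using h.symm
  have hmemF : ∀ t, t ∈ dfirst [] trips ↔ trips.find? (fun x => x.1 == t.1) = some t := by
    apply mem_iff_first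
    · intro t ht
      exact (dfirst_find trips [] t ht).1
    · intro nn hnn
      rw [hnamesF]
      exact (PySem.Set.mem_ofList _ nn).mpr hnn
  -- the two dedup results coincide (sorted by name, first input occurrence per name)
  have hD : PySem.List.sorted (dfirst [] trips) (fun t => t.1) false = pvDedup none S := by
    apply PySem.List.sorted_eq_of_perm_of_pairwise_lt
    · refine (List.perm_ext_iff_of_nodup ?_ ?_).mpr (fun t => by rw [hmemD, hmemF])
      · exact hd2.imp (fun h e => absurd h (by rw [e]; exact lt_irrefl _))
      · exact List.Nodup.of_map _ (hnamesF ▸ PySem.Set.nodup_ofList _)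
    · exact hd2
  rw [hitems, hentries, ← hS, linesB_eq_map, ← hD,
    PySem.List.foldl_append_singleton_eq_map]
  rfl
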